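-- pv_equiv track=rewrite | github.com/BlueFlashX1/betterdiscord-assets | scripts/migrate_theme_to_modular.py | text_outside_comments_and_strings
-- ===== SOURCE A (Python) =====
-- def text_outside_comments_and_strings(text: str) -> str:
--     i = 0
--     out: list[str] = []
--     in_block_comment = False
--     in_quote: str | None = None
--
--     while i < len(text):
--         ch = text[i]
--
--         if in_block_comment:
--             if text.startswith("*/", i):
--                 in_block_comment = False
--                 i += 2
--                 continue
--             if ch == "\n":
--                 out.append("\n")
--             i += 1
--             continue
--
--         if in_quote is not None:
--             if ch == "\n":
--                 out.append("\n")
--             if ch == in_quote and (i == 0 or text[i - 1] != "\\"):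
--                 in_quote = None
--             i += 1
--             continue
--
--         if text.startswith("/*", i):
--             in_block_comment = True
--             i += 2
--             continue
--
--         if ch in ("'", '"'):
--             in_quote = ch
--             i += 1
--             continue
--
--         out.append(ch)
--         i += 1
--
--     return "".join(out)
-- ===== SOURCE B (Python) =====
-- def text_outside_comments_and_strings(text: str) -> str:
--     out = []
--     i, n = 0, len(text)
--     while i < n:
--         ch = text[i]
--         if ch == "/" and text.startswith("*", i + 1):
--             end = text.find("*/", i + 2)
--             if end == -1:
--                 out.append("\n" * text.count("\n", i + 2))
--                 break
--             out.append("\n" * text.count("\n", i + 2, end))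
--             i = end + 2
--         elif ch in "'\"":
--             j = i + 1
--             while j < n and not (text[j] == ch and text[j - 1] != "\\"):
--                 j += 1
--             if j == n:
--                 out.append("\n" * text.count("\n", i + 1))
--                 break
--             out.append("\n" * text.count("\n", i + 1, j))
--             i = j + 1
--         else:
--             out.append(ch)
--             i += 1
--     return "".join(out)
-- ===== Notes on version B (the rewrite author's own statement) =====
-- stated objective: faster
-- what changed: Replaced the char-by-char boolean state machine with a span-jumping scanner: on seeing a comment opener or a quote it locates the closing delimiter with str.find / a forward scan, emits the skipped span's newlines at once via str.count, and jumps past the span, so no mode flags are carried across iterations.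
import Mathlib
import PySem

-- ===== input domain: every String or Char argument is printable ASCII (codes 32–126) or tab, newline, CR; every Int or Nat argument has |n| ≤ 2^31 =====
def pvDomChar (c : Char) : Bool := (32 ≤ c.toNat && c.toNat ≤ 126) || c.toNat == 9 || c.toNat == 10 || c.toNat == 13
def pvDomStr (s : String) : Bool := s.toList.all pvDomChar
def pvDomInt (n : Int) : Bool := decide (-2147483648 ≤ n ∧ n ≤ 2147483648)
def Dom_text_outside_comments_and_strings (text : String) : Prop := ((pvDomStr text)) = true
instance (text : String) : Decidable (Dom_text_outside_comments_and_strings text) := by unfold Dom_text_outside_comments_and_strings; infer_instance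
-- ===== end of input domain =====

-- B replaces A's char-by-char state machine with a span-jumping scanner (find the closing delimiter, emit the span's newlines at once); a timing run measured it faster; equal return value is proved on all inputs.

-- ===== PORT A =====
-- A's while-loop over index i, carried state (in_block_comment, in_quote, prev = text[i-1]);
-- text.startswith("*/", i) is ported as the head test on the remaining characters.
def goA : List Char → Bool → Option Char → Option Char → List Char
  | [], _, _, _ => []
  | c :: rest, inBC, inQ, prev =>
    if inBC then
      if c = '*' ∧ rest.head? = some '/' then goA rest.tail false inQ (some '/')
      else (if c = '\n' then ['\n'] else []) ++ goA rest true inQ (some c)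
    else
      match inQ with
      | some q =>
        (if c = '\n' then ['\n'] else []) ++
        (if c = q ∧ prev ≠ some '\\' then goA rest false none (some c)
         else goA rest false (some q) (some c))
      | none =>
        if c = '/' ∧ rest.head? = some '*' then goA rest.tail true none (some '*')
        else if c = '\'' ∨ c = '"' then goA rest false (some c) (some c)
        else c :: goA rest false none (some c)
  termination_by l _ _ _ => l.length
  decreasing_by all_goals simp [List.length_tail]

def text_outside_comments_and_strings (text : String) : String :=
  String.ofList (goA text.toList false none none)

-- ===== PORT B =====
-- B's text.find("*/", i+2): chars before the closing "*/" plus the remainder after it.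
def findCommentEnd : List Char → Option (List Char × List Char)
  | [] => none
  | c :: rest =>
    if c = '*' ∧ rest.head? = some '/' then some ([], rest.tail)
    else (findCommentEnd rest).map (fun p => (c :: p.1, p.2))

-- B's inner while loop advancing j to the first unescaped closing quote.
def findQuoteEnd (q : Char) : Char → List Char → Option (List Char × List Char)
  | _, [] => none
  | prev, c :: rest =>
    if c = q ∧ prev ≠ '\\' then some ([], rest)
    else (findQuoteEnd q c rest).map (fun p => (c :: p.1, p.2))

-- B's '\n' * span.count('\n')
def nlOnly (l : List Char) : List Char := List.replicate (l.count '\n') '\n'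

theorem findCommentEnd_length : ∀ (l sp r : List Char), findCommentEnd l = some (sp, r) → r.length < l.length := by
  intro l
  induction l with
  | nil => intro sp r h; simp [findCommentEnd] at h
  | cons c rest ih =>
    intro sp r h
    simp only [findCommentEnd] at h
    split_ifs at h with hc
    · simp only [Option.some.injEq, Prod.mk.injEq] at h
      obtain ⟨h1, h2⟩ := h
      have : rest.tail.length ≤ rest.length := by simp [List.length_tail]
      simp [← h2]
    · rcases Option.map_eq_some_iff.mp h with ⟨⟨sp', r'⟩, hfe, hp⟩
      simp only [Prod.mk.injEq] at hp
      obtain ⟨h1, h2⟩ := hp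
      have := ih sp' r' hfe
      simp [← h2]; omega

theorem findQuoteEnd_length : ∀ (l : List Char) (q p : Char) (sp r : List Char), findQuoteEnd q p l = some (sp, r) → r.length < l.length := by
  intro l
  induction l with
  | nil => intro q p sp r h; simp [findQuoteEnd] at h
  | cons c rest ih =>
    intro q p sp r h
    simp only [findQuoteEnd] at h
    split_ifs at h with hc
    · simp only [Option.some.injEq, Prod.mk.injEq] at h
      obtain ⟨h1, h2⟩ := h
      simp [← h2]
    · rcases Option.map_eq_some_iff.mp h with ⟨⟨sp', r'⟩, hfe, hp⟩
      simp only [Prod.mk.injEq] at hp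
      obtain ⟨h1, h2⟩ := hp
      have := ih q c sp' r' hfe
      simp [← h2]; omega

def goB : List Char → List Char
  | [] => []
  | c :: rest =>
    if c = '/' ∧ rest.head? = some '*' then
      match h : findCommentEnd rest.tail with
      | none => nlOnly rest.tail
      | some (sp, r) => nlOnly sp ++ goB r
    else if c = '\'' ∨ c = '"' then
      match h : findQuoteEnd c c rest with
      | none => nlOnly rest
      | some (sp, r) => nlOnly sp ++ goB r
    else c :: goB rest
  termination_by l => l.length
  decreasing_by
  · have := findCommentEnd_length _ _ _ h
    have : rest.tail.length ≤ rest.length := by simp [List.length_tail]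
    simp_all; omega
  · have := findQuoteEnd_length _ _ _ _ _ h
    simp_all; omega
  · simp

def text_outside_comments_and_strings_alt (text : String) : String :=
  String.ofList (goB text.toList)

-- ===== PRECONDITION & SPEC =====
def Spec_text_outside_comments_and_strings (text : String) (out : String) : Prop := out = text_outside_comments_and_strings_alt text
instance (text : String) (out : String) : Decidable (Spec_text_outside_comments_and_strings text out) := by unfold Spec_text_outside_comments_and_strings; infer_instance

-- ===== CLAIM (what is proved, stated in full; the proofs are below) =====
def Claim_equal_text_outside_comments_and_strings : Prop := ∀ (text : String), Dom_text_outside_comments_and_strings text → Spec_text_outside_comments_and_strings text (text_outside_comments_and_strings text)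

-- ===== LEMMAS AND PROOFS =====

theorem nlOnly_cons (c : Char) (l : List Char) :
    nlOnly (c :: l) = (if c = '\n' then ['\n'] else []) ++ nlOnly l := by
  by_cases h : c = '\n' <;> simp [nlOnly, h, List.replicate_succ]

-- comment mode: goA scans exactly to findCommentEnd's close
theorem goA_comment : ∀ (n : Nat) (l : List Char), l.length ≤ n → ∀ (inQ prev : Option Char),
    goA l true inQ prev =
      (match findCommentEnd l with
       | none => nlOnly l
       | some (sp, r) => nlOnly sp ++ goA r false inQ (some '/')) := by
  intro n
  induction n with
  | zero =>
    intro l hl inQ prev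
    have : l = [] := List.length_eq_zero_iff.mp (Nat.le_zero.mp hl)
    subst this
    simp [goA, findCommentEnd, nlOnly]
  | succ n ih =>
    intro l hl inQ prev
    cases l with
    | nil => simp [goA, findCommentEnd, nlOnly]
    | cons c rest =>
      by_cases hc : c = '*' ∧ rest.head? = some '/'
      · rw [goA.eq_def]
        simp [findCommentEnd, hc, nlOnly]
      · have hrest : rest.length ≤ n := by simp at hl; omega
        rw [goA.eq_def]
        cases hfe : findCommentEnd rest with
        | none => simp [findCommentEnd, hc, hfe, nlOnly_cons, ih rest hrest inQ (some c)]
        | some p =>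
          obtain ⟨sp, r⟩ := p
          simp [findCommentEnd, hc, hfe, nlOnly_cons, List.append_assoc, ih rest hrest inQ (some c)]

-- quote mode: goA scans exactly to findQuoteEnd's close
theorem goA_quote : ∀ (n : Nat) (l : List Char), l.length ≤ n → ∀ (q p : Char), q ≠ '\n' →
    goA l false (some q) (some p) =
      (match findQuoteEnd q p l with
       | none => nlOnly l
       | some (sp, r) => nlOnly sp ++ goA r false none (some q)) := by
  intro n
  induction n with
  | zero =>
    intro l hl q p hq
    have : l = [] := List.length_eq_zero_iff.mp (Nat.le_zero.mp hl)
    subst this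
    simp [goA, findQuoteEnd, nlOnly]
  | succ n ih =>
    intro l hl q p hq
    cases l with
    | nil => simp [goA, findQuoteEnd, nlOnly]
    | cons c rest =>
      rw [goA]
      by_cases hc : c = q ∧ p ≠ '\\'
      · -- closing quote: c = q, so c ≠ '\n'
        have hcq : c = q := hc.1
        have hcn : ¬ c = '\n' := by rw [hcq]; exact hq
        have hprev : (c = q ∧ (some p : Option Char) ≠ some '\\') := by
          exact ⟨hc.1, by simpa using hc.2⟩
        simp [findQuoteEnd, hc, hprev, nlOnly, hcq, hq]
      · have hprev : ¬ (c = q ∧ (some p : Option Char) ≠ some '\\') := by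
          simpa using hc
        have hrest : rest.length ≤ n := by simp at hl; omega
        rw [if_neg hprev]
        rw [ih rest hrest q c hq]
        cases hfe : findQuoteEnd q c rest with
        | none => simp [findQuoteEnd, hc, hfe, nlOnly_cons]
        | some pr =>
          obtain ⟨sp, r⟩ := pr
          simp [findQuoteEnd, hc, hfe, nlOnly_cons, List.append_assoc]

theorem goA_eq_goB : ∀ (n : Nat) (l : List Char), l.length ≤ n → ∀ (prev : Option Char),
    goA l false none prev = goB l := by
  intro n
  induction n with
  | zero =>
    intro l hl prev
    have : l = [] := List.length_eq_zero_iff.mp (Nat.le_zero.mp hl)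
    subst this
    simp [goA, goB]
  | succ n ih =>
    intro l hl prev
    cases l with
    | nil => simp [goA, goB]
    | cons c rest =>
      have hrest : rest.length ≤ n := by simp at hl; omega
      rw [goA, goB]
      by_cases h1 : c = '/' ∧ rest.head? = some '*'
      · rw [if_pos h1, if_pos h1]
        have htail : rest.tail.length ≤ n := by
          simp [List.length_tail]; omega
        rw [goA_comment rest.tail.length rest.tail le_rfl none (some '*')]
        cases hfe : findCommentEnd rest.tail with
        | none => simp [hfe]
        | some p =>
          obtain ⟨sp, r⟩ := p
          have hr : r.length ≤ n := by
            have := findCommentEnd_length rest.tail sp r hfe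
            omega
          simp only [hfe]
          rw [ih r hr (some '/')]
          simp
      · rw [if_neg h1, if_neg h1]
        by_cases h2 : c = '\'' ∨ c = '"'
        · rw [if_pos h2, if_pos h2]
          have hq : c ≠ '\n' := by rcases h2 with h | h <;> simp [h]
          rw [goA_quote rest.length rest le_rfl c c hq]
          cases hfe : findQuoteEnd c c rest with
          | none => simp [hfe]
          | some p =>
            obtain ⟨sp, r⟩ := p
            have hr : r.length ≤ n := by
              have := findQuoteEnd_length rest c c sp r hfe
              omega
            simp only [hfe]
            rw [ih r hr (some c)]
            simp
        · rw [if_neg h2, if_neg h2]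
          rw [ih rest hrest (some c)]
          simp

-- ===== VERDICT (by name: the statement is the Claim_ definition above) =====
theorem text_outside_comments_and_strings_spec : Claim_equal_text_outside_comments_and_strings := by
  intro text _
  unfold Spec_text_outside_comments_and_strings text_outside_comments_and_strings text_outside_comments_and_strings_alt
  exact congrArg String.ofList (goA_eq_goB text.toList.length text.toList le_rfl none)
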